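-- pv_equiv track=rewrite | github.com/TwinKay/Algorithms | 프로그래머스/lv1/76501. 음양 더하기/음양 더하기.py | solution
-- ===== SOURCE A (Python) =====
-- def solution(absolutes, signs):
--     answer = 0
--     for i,j in enumerate(absolutes):
--         if signs[i] == True:
--             answer += j
--         else:
--             answer -= j
--     return answer
-- ===== SOURCE B (Python) =====
-- def solution(absolutes, signs):
--     total = sum(absolutes)
--     neg = 0
--     for i in range(len(absolutes)):
--         if signs[i] != True:
--             neg += absolutes[i]
--     return total - 2 * neg
-- ===== Notes on version B (the rewrite author's own statement) =====
-- stated objective: alternative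
-- what changed: Instead of one branching accumulation, B takes the grand total sum(absolutes) and subtracts twice the sum of the negatively-signed entries in a filtered index pass.
import Mathlib
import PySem

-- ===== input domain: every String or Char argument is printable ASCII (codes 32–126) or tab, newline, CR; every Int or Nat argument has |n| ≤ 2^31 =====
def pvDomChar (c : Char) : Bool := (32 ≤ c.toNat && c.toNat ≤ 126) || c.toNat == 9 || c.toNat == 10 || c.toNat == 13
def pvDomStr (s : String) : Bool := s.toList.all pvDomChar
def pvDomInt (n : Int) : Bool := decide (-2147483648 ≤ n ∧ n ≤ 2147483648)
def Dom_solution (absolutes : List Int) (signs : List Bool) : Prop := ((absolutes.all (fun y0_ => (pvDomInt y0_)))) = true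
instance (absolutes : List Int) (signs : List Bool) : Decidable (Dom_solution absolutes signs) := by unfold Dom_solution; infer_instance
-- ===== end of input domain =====

-- B computes sum(absolutes) minus twice the sum of negatively-signed entries, instead of A's one branching accumulation (alternative decomposition, same cost).


-- ===== PORT A =====
def solution (absolutes : List Int) (signs : List Bool) : Int :=
  (PySem.List.enumerate absolutes 0).foldl
    (fun answer ij =>
      if (PySem.List.pyGetD signs ij.1 false) == true then answer + ij.2 else answer - ij.2)
    0

-- ===== PORT B =====
def solution_alt (absolutes : List Int) (signs : List Bool) : Int :=
  let total := absolutes.sum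
  let neg := (PySem.List.pyRange 0 (absolutes.length : Int) 1).foldl
    (fun neg i =>
      if (PySem.List.pyGetD signs i false) != true
      then neg + PySem.List.pyGetD absolutes i 0 else neg)
    0
  total - 2 * neg

-- ===== PRECONDITION & SPEC =====
-- Pre_ excludes exactly the inputs where signs is shorter than absolutes: there both A and B raise IndexError.
def Pre_solution (absolutes : List Int) (signs : List Bool) : Prop :=
  absolutes.length ≤ signs.length
instance (absolutes : List Int) (signs : List Bool) : Decidable (Pre_solution absolutes signs) := by
  unfold Pre_solution; infer_instance

def pvWitness_solution : List Int × List Bool := ([4, 7, 12], [true, false, true])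

def Spec_solution (absolutes : List Int) (signs : List Bool) (out : Int) : Prop := out = solution_alt absolutes signs
instance (absolutes : List Int) (signs : List Bool) (out : Int) : Decidable (Spec_solution absolutes signs out) := by unfold Spec_solution; infer_instance

-- ===== CLAIM (what is proved, stated in full; the proofs are below) =====
def Claim_equal_solution : Prop := ∀ (absolutes : List Int) (signs : List Bool), Dom_solution absolutes signs → Pre_solution absolutes signs → Spec_solution absolutes signs (solution absolutes signs)

-- ===== LEMMAS AND PROOFS =====

-- signed sum over pairs: what A computes
def signedSum (l : List (Int × Bool)) : Int :=
  (l.map (fun p => if p.2 then p.1 else -p.1)).sum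

-- sum of the negatively-signed first components: B's correction term
def negSum (l : List (Int × Bool)) : Int :=
  (l.map (fun p => if p.2 then 0 else p.1)).sum

lemma signedSum_eq (l : List (Int × Bool)) :
    signedSum l = (l.map (·.1)).sum - 2 * negSum l := by
  induction l with
  | nil => simp [signedSum, negSum]
  | cons p l ih =>
    simp only [signedSum, negSum, List.map_cons, List.sum_cons] at *
    by_cases h : p.2 <;> simp [h] <;> linarith [ih]

lemma A_fold (absolutes : List Int) (signs : List Bool) :
    ∀ (s : Nat) (acc : Int), s + absolutes.length ≤ signs.length →
    (PySem.List.enumerate absolutes (s : Int)).foldl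
      (fun answer ij =>
        if (PySem.List.pyGetD signs ij.1 false) == true then answer + ij.2 else answer - ij.2)
      acc
    = acc + signedSum (absolutes.zip (signs.drop s)) := by
  induction absolutes with
  | nil => intro s acc _; simp [PySem.List.enumerate_nil, signedSum]
  | cons a as ih =>
    intro s acc h
    have hs : s < signs.length := by simp at h; omega
    rw [PySem.List.enumerate_cons, List.foldl_cons]
    have hget : PySem.List.pyGetD signs (s : Int) false = signs[s] := by
      rw [PySem.List.pyGetD_natCast]; exact List.getD_eq_getElem signs false hs
    have hdrop : signs.drop s = signs[s] :: signs.drop (s + 1) :=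
      (List.getElem_cons_drop hs).symm
    have hcast : ((s : Int) + 1) = ((s + 1 : Nat) : Int) := by push_cast; ring
    rw [hcast, ih (s + 1) _ (by simp at h ⊢; omega)]
    rw [hdrop]
    simp only [List.zip_cons_cons, signedSum, List.map_cons, List.sum_cons, hget]
    by_cases hb : signs[s] <;> simp [hb] <;> ring

lemma B_fold (absolutes : List Int) (signs : List Bool) (n : Nat) :
    ∀ (s : Nat) (acc : Int), s + n = absolutes.length → absolutes.length ≤ signs.length →
    (PySem.List.pyRange (s : Int) (absolutes.length : Int) 1).foldl
      (fun neg i =>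
        if (PySem.List.pyGetD signs i false) != true
        then neg + PySem.List.pyGetD absolutes i 0 else neg)
      acc
    = acc + negSum ((absolutes.drop s).zip (signs.drop s)) := by
  induction n with
  | zero =>
    intro s acc h _
    rw [PySem.List.pyRange_one_eq_nil (by omega)]
    simp [List.drop_eq_nil_of_le (by omega : absolutes.length ≤ s), negSum]
  | succ n ih =>
    intro s acc h hlen
    have hsa : s < absolutes.length := by omega
    have hss : s < signs.length := by omega
    rw [PySem.List.pyRange_one_cons (by exact_mod_cast hsa), List.foldl_cons]
    have hgs : PySem.List.pyGetD signs (s : Int) false = signs[s] := by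
      rw [PySem.List.pyGetD_natCast]; exact List.getD_eq_getElem signs false hss
    have hga : PySem.List.pyGetD absolutes (s : Int) 0 = absolutes[s] := by
      rw [PySem.List.pyGetD_natCast]; exact List.getD_eq_getElem absolutes 0 hsa
    have hcast : ((s : Int) + 1) = ((s + 1 : Nat) : Int) := by push_cast; ring
    rw [hcast, ih (s + 1) _ (by omega) hlen]
    rw [(List.getElem_cons_drop hsa).symm, (List.getElem_cons_drop hss).symm]
    simp only [List.zip_cons_cons, negSum, List.map_cons, List.sum_cons, hgs, hga]
    by_cases hb : signs[s] <;> simp [hb] <;> ring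

-- ===== VERDICT (by name: the statement is the Claim_ definition above) =====
theorem solution_spec : Claim_equal_solution := by
  intro absolutes signs _ hpre
  unfold Spec_solution solution solution_alt
  have hA := A_fold absolutes signs 0 0 (by simpa using hpre)
  have hB := B_fold absolutes signs absolutes.length 0 0 (by omega) hpre
  simp only [Nat.cast_zero] at hA hB
  rw [hA, hB]
  simp only [List.drop_zero, zero_add]
  rw [signedSum_eq]
  have hle : absolutes.length ≤ signs.length := hpre
  simp [List.map_fst_zip hle]
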